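-- pv_equiv track=rewrite | github.com/MarcosAndre5/geradorFolhaPonto | pdf_gen.py | montarTabela
-- ===== SOURCE A (Python) =====
-- def montarTabela(nome, linhas, mes, diferencaDias, feriados):
--     dadosTabela = [[nome.upper()]]
--
--     sabado = False
--     for i in range(0, linhas + 1):
--         if i == 0:
--             dadosTabela.append(['DATA', 'ENTRADA', 'ASSINATURA', '', '', '', '', '', '', '', 'SAÍDA'])
--         elif i % 7 == diferencaDias:
--             dadosTabela.append(["{:02d}".format(i) + '/' + "{:02d}".format(mes), '', 'SÁBADO', '', '', '', '', '', '', '', ''])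
--             sabado = True
--         elif i % 7 == diferencaDias + 1 or sabado == True:
--             dadosTabela.append(["{:02d}".format(i) + '/' + "{:02d}".format(mes), '', 'DOMINGO', '', '', '', '', '', '', '', ''])
--             sabado = False
--         elif str(i) in feriados:
--             dadosTabela.append(["{:02d}".format(i) + '/' + "{:02d}".format(mes), '', 'FERIADO', '', '', '', '', '', '', '', ''])
--         else:
--             dadosTabela.append(["{:02d}".format(i) + '/' + "{:02d}".format(mes), ':', '', '', '', '', '', '', '', '', ':'])
--
--     return dadosTabela
-- ===== SOURCE B (Python) =====
-- HEADER = ['DATA', 'ENTRADA', 'ASSINATURA', '', '', '', '', '', '', '', 'SAÍDA']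
--
--
-- def montarTabela(nome, linhas, mes, diferencaDias, feriados):
--     head = [[nome.upper()]]
--     if linhas < 0:
--         return head
--
--     # Phase 1: precompute a day -> label map by stepping a whole week at a
--     # time from the first Saturday / first modular Sunday (no per-day test,
--     # no carried flag).
--     labels = {}
--     if 0 <= diferencaDias <= 6:
--         for s in range(7 if diferencaDias == 0 else diferencaDias, linhas + 1, 7):
--             labels[s] = 'SÁBADO'
--             labels[s + 1] = 'DOMINGO'
--     e = diferencaDias + 1
--     if 0 <= e <= 6:
--         for u in range(7 if e == 0 else e, linhas + 1, 7):
--             labels[u] = 'DOMINGO'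
--
--     feri = set(feriados)
--
--     # Phase 2: materialize the rows from the map.
--     def mk(i):
--         data = "{:02d}/{:02d}".format(i, mes)
--         lab = labels.get(i)
--         if lab is not None:
--             return [data, '', lab, '', '', '', '', '', '', '', '']
--         if str(i) in feri:
--             return [data, '', 'FERIADO', '', '', '', '', '', '', '', '']
--         return [data, ':', '', '', '', '', '', '', '', '', ':']
--
--     return head + [HEADER] + [mk(i) for i in range(1, linhas + 1)]
-- ===== Notes on version B (the rewrite author's own statement) =====
-- stated objective: faster
-- what changed: Instead of A's single stateful per-day loop (carried `sabado` flag, per-day mod test, per-day linear scan of feriados), B precomputes a day->label dict by stepping a week at a time from the first Saturday and first modular Sunday, converts feriados to a set once, and then materializes the rows from the map in a second pass.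
import Mathlib
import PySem

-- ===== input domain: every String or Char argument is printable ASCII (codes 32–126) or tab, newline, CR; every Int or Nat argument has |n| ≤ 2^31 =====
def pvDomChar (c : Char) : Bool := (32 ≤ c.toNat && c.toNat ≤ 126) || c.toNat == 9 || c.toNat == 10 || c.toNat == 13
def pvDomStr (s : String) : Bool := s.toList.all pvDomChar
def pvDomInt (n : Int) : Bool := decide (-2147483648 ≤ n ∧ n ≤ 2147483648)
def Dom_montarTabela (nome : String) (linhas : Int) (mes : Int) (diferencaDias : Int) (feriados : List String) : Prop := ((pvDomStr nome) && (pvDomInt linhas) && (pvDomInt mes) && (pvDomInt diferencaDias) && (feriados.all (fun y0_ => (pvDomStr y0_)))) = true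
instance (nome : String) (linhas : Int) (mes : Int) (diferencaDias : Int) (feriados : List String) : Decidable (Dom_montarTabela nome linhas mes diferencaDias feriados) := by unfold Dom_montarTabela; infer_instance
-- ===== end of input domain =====

-- B replaces A's single stateful per-day loop (carried `sabado` flag, per-day mod
-- test and per-day list scan of feriados) by: precompute a day→label dict by
-- stepping a week at a time from the first Saturday / first modular Sunday,
-- convert feriados to a set once, then materialize the rows from the map.

-- ===== PORT A =====
-- "{:02d}".format(n): zero-pad to width 2 (only 0..9 need a pad; sign counts in the width)
def pvFmt02 (n : Int) : String := if 0 ≤ n ∧ n ≤ 9 then "0" ++ PySem.Int.toStr n else PySem.Int.toStr n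

def pvData (i mes : Int) : String := pvFmt02 i ++ "/" ++ pvFmt02 mes

def pvHeaderRow : List String := ["DATA", "ENTRADA", "ASSINATURA", "", "", "", "", "", "", "", "SAÍDA"]

def pvLabelRow (i mes : Int) (lab : String) : List String :=
  [pvData i mes, "", lab, "", "", "", "", "", "", "", ""]

def pvNormalRow (i mes : Int) : List String :=
  [pvData i mes, ":", "", "", "", "", "", "", "", "", ":"]

-- the body of A's for-loop, state = (dadosTabela, sabado)
def pvStepA (mes diferencaDias : Int) (feriados : List String)
    (st : List (List String) × Bool) (i : Int) : List (List String) × Bool :=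
  if i == 0 then (st.1 ++ [pvHeaderRow], st.2)
  else if PySem.Int.mod i 7 == diferencaDias then
    (st.1 ++ [pvLabelRow i mes "SÁBADO"], true)
  else if PySem.Int.mod i 7 == diferencaDias + 1 || st.2 then
    (st.1 ++ [pvLabelRow i mes "DOMINGO"], false)
  else if feriados.contains (PySem.Int.toStr i) then
    (st.1 ++ [pvLabelRow i mes "FERIADO"], st.2)
  else
    (st.1 ++ [pvNormalRow i mes], st.2)

def montarTabela (nome : String) (linhas : Int) (mes : Int) (diferencaDias : Int) (feriados : List String) : List (List String) :=
  ((PySem.List.pyRange 0 (linhas + 1) 1).foldl (pvStepA mes diferencaDias feriados)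
    ([[PySem.Str.upper nome]], false)).1

-- ===== PORT B =====
-- phase 1: day → label dict, built by stepping 7 at a time (Source B's two range(…,…,7) loops)
def pvLabels (n d : Int) : PySem.Dict Int String :=
  let lab0 : PySem.Dict Int String := PySem.Dict.empty
  let lab1 :=
    if 0 ≤ d ∧ d ≤ 6 then
      (PySem.List.pyRange (if d = 0 then 7 else d) (n + 1) 7).foldl
        (fun acc s => (acc.insert s "SÁBADO").insert (s + 1) "DOMINGO") lab0
    else lab0
  if 0 ≤ d + 1 ∧ d + 1 ≤ 6 then
    (PySem.List.pyRange (if d + 1 = 0 then 7 else d + 1) (n + 1) 7).foldl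
      (fun acc u => acc.insert u "DOMINGO") lab1
  else lab1

-- phase 2: materialize one row from the map and the holiday set (Source B's mk)
def pvMkRow (mes : Int) (labels : PySem.Dict Int String) (feri : PySem.Set String) (i : Int) : List String :=
  match labels.get? i with
  | some lab => pvLabelRow i mes lab
  | none =>
      if PySem.Set.contains feri (PySem.Int.toStr i) then pvLabelRow i mes "FERIADO"
      else pvNormalRow i mes

def montarTabela_alt (nome : String) (linhas : Int) (mes : Int) (diferencaDias : Int) (feriados : List String) : List (List String) :=
  let head := [[PySem.Str.upper nome]]
  if linhas < 0 then head
  else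
    let labels := pvLabels linhas diferencaDias
    let feri := PySem.Set.ofList feriados
    head ++ [pvHeaderRow] ++ (PySem.List.pyRange 1 (linhas + 1) 1).map (pvMkRow mes labels feri)

-- ===== PRECONDITION & SPEC =====
def Spec_montarTabela (nome : String) (linhas : Int) (mes : Int) (diferencaDias : Int) (feriados : List String) (out : List (List String)) : Prop := out = montarTabela_alt nome linhas mes diferencaDias feriados
instance (nome : String) (linhas : Int) (mes : Int) (diferencaDias : Int) (feriados : List String) (out : List (List String)) : Decidable (Spec_montarTabela nome linhas mes diferencaDias feriados out) := by unfold Spec_montarTabela; infer_instance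

-- ===== CLAIM (what is proved, stated in full; the proofs are below) =====
def Claim_equal_montarTabela : Prop := ∀ (nome : String) (linhas : Int) (mes : Int) (diferencaDias : Int) (feriados : List String), Dom_montarTabela nome linhas mes diferencaDias feriados → Spec_montarTabela nome linhas mes diferencaDias feriados (montarTabela nome linhas mes diferencaDias feriados)

-- ===== LEMMAS AND PROOFS =====

-- closed-form per-day classification (proof-side only): A's label for day i ∈ 1..linhas
def pvLabel (diferencaDias : Int) (feriados : List String) (i : Int) : Option String :=
  if PySem.Int.mod i 7 == diferencaDias then some "SÁBADO"
  else if PySem.Int.mod i 7 == diferencaDias + 1 || (decide (2 ≤ i) && (PySem.Int.mod (i - 1) 7 == diferencaDias)) then some "DOMINGO"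
  else if feriados.contains (PySem.Int.toStr i) then some "FERIADO"
  else none

def pvRow (mes diferencaDias : Int) (feriados : List String) (i : Int) : List String :=
  match pvLabel diferencaDias feriados i with
  | none => pvNormalRow i mes
  | some lab => pvLabelRow i mes lab

-- the value of A's flag after the loop has processed days 1..m
def pvFlag (diferencaDias : Int) (m : Nat) : Bool :=
  decide (1 ≤ m) && (PySem.Int.mod (m : Int) 7 == diferencaDias)

lemma pv_loop (mes diferencaDias : Int) (feriados : List String)
    (rows0 : List (List String)) (m : Nat) :
    (PySem.List.pyRange 1 ((m : Int) + 1) 1).foldl (pvStepA mes diferencaDias feriados)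
      (rows0, pvFlag diferencaDias 0) =
    (rows0 ++ (PySem.List.pyRange 1 ((m : Int) + 1) 1).map (pvRow mes diferencaDias feriados),
      pvFlag diferencaDias m) := by
  induction m with
  | zero =>
      rw [PySem.List.pyRange_one_eq_nil (by norm_num)]
      simp
  | succ m ih =>
      have hsplit : PySem.List.pyRange 1 ((↑(m + 1) : Int) + 1) 1 =
          PySem.List.pyRange 1 ((m : Int) + 1) 1 ++ [(m : Int) + 1] := by
        push_cast
        exact PySem.List.pyRange_one_succ_right (by omega)
      rw [hsplit, List.foldl_append, ih, List.map_append]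
      set i : Int := (m : Int) + 1 with hi
      clear_value i
      have hi0 : (i == 0) = false := by simp [hi]; omega
      have hge2 : decide (2 ≤ i) = decide (1 ≤ m) := by simp [hi]; omega
      have hm1 : i - 1 = (m : Int) := by omega
      have hcast : ((↑(m + 1) : Int)) = i := by rw [hi]; push_cast; ring
      simp only [List.foldl_cons, List.foldl_nil, List.map_cons, List.map_nil]
      unfold pvStepA pvRow pvLabel
      rw [hi0]
      simp only [Bool.false_eq_true, if_false]
      by_cases hsat : (PySem.Int.mod i 7 == diferencaDias) = true
      · have hflag1 : pvFlag diferencaDias (m + 1) = true := by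
          unfold pvFlag; rw [hcast, hsat]; simp
        have Hsat : i % 7 = diferencaDias := by simpa [PySem.Int.mod, Int.fmod_eq_emod] using hsat
        simp [Hsat, hflag1, List.append_assoc]
      · have hsat' : (PySem.Int.mod i 7 == diferencaDias) = false := eq_false_of_ne_true hsat
        have hflag1 : pvFlag diferencaDias (m + 1) = false := by
          unfold pvFlag; rw [hcast, hsat']; simp
        have Hsat : ¬ i % 7 = diferencaDias := by simpa [PySem.Int.mod, Int.fmod_eq_emod] using hsat
        have hsunIff : (pvFlag diferencaDias m = true) ↔ (2 ≤ i ∧ (i - 1) % 7 = diferencaDias) := by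
          unfold pvFlag
          rw [show PySem.Int.mod ((m : Int)) 7 = (m : Int) % 7 by
                simp [PySem.Int.mod, Int.fmod_eq_emod],
              ← hm1]
          simp only [Bool.and_eq_true, decide_eq_true_eq, beq_iff_eq]
          constructor
          · rintro ⟨h1, h2⟩; exact ⟨by omega, h2⟩
          · rintro ⟨h1, h2⟩; exact ⟨by omega, h2⟩
        by_cases hS : i % 7 = diferencaDias + 1 ∨ pvFlag diferencaDias m = true
        · have hS' : i % 7 = diferencaDias + 1 ∨ (2 ≤ i ∧ (i - 1) % 7 = diferencaDias) :=
            hS.imp id hsunIff.mp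
          simp [Hsat, hS, hS', hflag1, List.append_assoc]
        · have hS' : ¬(i % 7 = diferencaDias + 1 ∨ (2 ≤ i ∧ (i - 1) % 7 = diferencaDias)) :=
            fun h => hS (h.imp id hsunIff.mpr)
          have hflag : pvFlag diferencaDias m = false := by
            rcases Bool.eq_false_or_eq_true (pvFlag diferencaDias m) with h | h
            · exact absurd (Or.inr h) hS
            · exact h
          have hS1 : ¬ i % 7 = diferencaDias + 1 := fun h => hS (Or.inl h)
          have hS2 : ¬ (2 ≤ i ∧ (i - 1) % 7 = diferencaDias) :=
            fun h => hS (Or.inr (hsunIff.mpr h))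
          by_cases hf : PySem.Int.toStr i ∈ feriados
          · simp [Hsat, hS1, hS2, hf, hflag, hflag1, List.append_assoc]
          · simp [Hsat, hS1, hS2, hf, hflag, hflag1, List.append_assoc]

-- membership in the unfolded step-7 range, arithmetically
lemma pv_mem_map_range (a : Int) (M : Nat) (i : Int) :
    i ∈ List.map (fun k : Nat => a + 7 * (k : Int)) (List.range M) ↔
      a ≤ i ∧ i < a + 7 * M ∧ (7 : Int) ∣ i - a := by
  simp only [List.mem_map, List.mem_range]
  constructor
  · rintro ⟨k, hk, rfl⟩
    exact ⟨by omega, by omega, by omega⟩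
  · rintro ⟨h1, h2, h3⟩
    exact ⟨(i - a).toNat / 7, by omega, by omega⟩

-- lookup after the Saturday fold: key a+7k holds SÁBADO, key a+7k+1 holds DOMINGO
lemma pv_sat_get (a : Int) (m : Nat) (D : PySem.Dict Int String) (i : Int) :
    ((List.map (fun k : Nat => a + 7 * (k : Int)) (List.range m)).foldl
        (fun acc s => (acc.insert s "SÁBADO").insert (s + 1) "DOMINGO") D).get? i =
      if a ≤ i ∧ i < a + 7 * m ∧ (7 : Int) ∣ i - a then some "SÁBADO"
      else if a ≤ i - 1 ∧ i - 1 < a + 7 * m ∧ (7 : Int) ∣ i - 1 - a then some "DOMINGO"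
      else D.get? i := by
  induction m with
  | zero =>
      simp only [List.range_zero, List.map_nil, List.foldl_nil]
      split_ifs <;> first | rfl | (exfalso; omega)
  | succ m ih =>
      rw [List.range_succ, List.map_append, List.foldl_append]
      simp only [List.map_cons, List.map_nil, List.foldl_cons, List.foldl_nil]
      rw [PySem.Dict.get?_insert, PySem.Dict.get?_insert, ih]
      split_ifs <;> first | rfl | (exfalso; omega)

-- lookup after the modular-Sunday fold: key a+7k holds DOMINGO
lemma pv_sun_get (a : Int) (m : Nat) (D : PySem.Dict Int String) (i : Int) :
    ((List.map (fun k : Nat => a + 7 * (k : Int)) (List.range m)).foldl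
        (fun acc u => acc.insert u "DOMINGO") D).get? i =
      if a ≤ i ∧ i < a + 7 * m ∧ (7 : Int) ∣ i - a then some "DOMINGO"
      else D.get? i := by
  induction m with
  | zero =>
      simp only [List.range_zero, List.map_nil, List.foldl_nil]
      split_ifs <;> first | rfl | (exfalso; omega)
  | succ m ih =>
      rw [List.range_succ, List.map_append, List.foldl_append]
      simp only [List.map_cons, List.map_nil, List.foldl_cons, List.foldl_nil]
      rw [PySem.Dict.get?_insert, ih]
      split_ifs <;> first | rfl | (exfalso; omega)

-- the same lemmas, with the range bound b instead of the element count
lemma pv_cond_iff (a b j : Int) :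
    (a ≤ j ∧ j < a + 7 * (if a < b then ((b - a + 7 - 1) / 7).toNat else 0) ∧ (7 : Int) ∣ j - a) ↔
      (a ≤ j ∧ j < b ∧ (7 : Int) ∣ j - a) := by
  rw [← pv_mem_map_range, ← PySem.List.pyRange_of_pos a b (by norm_num : (0:Int) < 7),
    PySem.List.mem_pyRange_iff_of_pos (by norm_num : (0:Int) < 7)]

lemma pv_sat_get_range (a b : Int) (D : PySem.Dict Int String) (i : Int) :
    ((PySem.List.pyRange a b 7).foldl
        (fun acc s => (acc.insert s "SÁBADO").insert (s + 1) "DOMINGO") D).get? i =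
      if a ≤ i ∧ i < b ∧ (7 : Int) ∣ i - a then some "SÁBADO"
      else if a ≤ i - 1 ∧ i - 1 < b ∧ (7 : Int) ∣ i - 1 - a then some "DOMINGO"
      else D.get? i := by
  rw [PySem.List.pyRange_of_pos a b (by norm_num : (0:Int) < 7), pv_sat_get]
  simp only [pv_cond_iff]

lemma pv_sun_get_range (a b : Int) (D : PySem.Dict Int String) (i : Int) :
    ((PySem.List.pyRange a b 7).foldl (fun acc u => acc.insert u "DOMINGO") D).get? i =
      if a ≤ i ∧ i < b ∧ (7 : Int) ∣ i - a then some "DOMINGO"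
      else D.get? i := by
  rw [PySem.List.pyRange_of_pos a b (by norm_num : (0:Int) < 7), pv_sun_get]
  simp only [pv_cond_iff]

-- lookup in B's label map on a queried day 1 ≤ i ≤ n is A's weekend classification
lemma pv_labels_get (n d i : Int) (h1 : 1 ≤ i) (h2 : i ≤ n) :
    (pvLabels n d).get? i =
      if i % 7 = d then some "SÁBADO"
      else if i % 7 = d + 1 ∨ (2 ≤ i ∧ (i - 1) % 7 = d) then some "DOMINGO"
      else none := by
  unfold pvLabels
  simp only
  by_cases hd : 0 ≤ d ∧ d ≤ 6 <;> by_cases he : 0 ≤ d + 1 ∧ d + 1 ≤ 6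
  · rw [if_pos hd, if_pos he, pv_sun_get_range, pv_sat_get_range, PySem.Dict.get?_empty]
    split_ifs <;> first | rfl | (exfalso; omega)
  · rw [if_pos hd, if_neg he, pv_sat_get_range, PySem.Dict.get?_empty]
    split_ifs <;> first | rfl | (exfalso; omega)
  · rw [if_neg hd, if_pos he, pv_sun_get_range, PySem.Dict.get?_empty]
    split_ifs <;> first | rfl | (exfalso; omega)
  · rw [if_neg hd, if_neg he, PySem.Dict.get?_empty]
    split_ifs <;> first | rfl | (exfalso; omega)

-- B's row builder agrees with the closed-form row on every queried day
lemma pv_row_eq (mes d n : Int) (feriados : List String) (i : Int)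
    (h1 : 1 ≤ i) (h2 : i ≤ n) :
    pvMkRow mes (pvLabels n d) (PySem.Set.ofList feriados) i = pvRow mes d feriados i := by
  have hc : PySem.Set.contains (PySem.Set.ofList feriados) (PySem.Int.toStr i) =
      feriados.contains (PySem.Int.toStr i) := by
    simp [PySem.Set.contains, PySem.Set.mem_ofList]
  unfold pvMkRow pvRow pvLabel
  rw [pv_labels_get n d i h1 h2, hc]
  have hm : PySem.Int.mod i 7 = i % 7 := by simp [PySem.Int.mod, Int.fmod_eq_emod]
  have hm1 : PySem.Int.mod (i - 1) 7 = (i - 1) % 7 := by simp [PySem.Int.mod, Int.fmod_eq_emod]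
  rw [hm, hm1]
  by_cases hs : i % 7 = d
  · simp [hs]
  · by_cases hu : i % 7 = d + 1
    · simp [hu]
    · by_cases hv : 2 ≤ i ∧ (i - 1) % 7 = d
      · simp [hs, hu, hv.1, hv.2]
      · have hnot : ¬(i % 7 = d + 1 ∨ 2 ≤ i ∧ (i - 1) % 7 = d) := by tauto
        rcases not_and_or.mp hv with hv1 | hv2
        · simp only [if_neg hs, if_neg hnot]
          by_cases hf : PySem.Int.toStr i ∈ feriados <;> simp [hs, hu, hv1, hf]
        · simp only [if_neg hs, if_neg hnot]
          by_cases hf : PySem.Int.toStr i ∈ feriados <;> simp [hs, hu, hv2, hf]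

-- ===== VERDICT (by name: the statement is the Claim_ definition above) =====
theorem montarTabela_spec : Claim_equal_montarTabela := by
  intro nome linhas mes diferencaDias feriados _
  unfold Spec_montarTabela montarTabela montarTabela_alt
  by_cases hneg : linhas < 0
  · rw [PySem.List.pyRange_one_eq_nil (by omega)]
    simp [hneg]
  · rw [not_lt] at hneg
    have hcons : PySem.List.pyRange 0 (linhas + 1) 1 =
        0 :: PySem.List.pyRange 1 (linhas + 1) 1 := by
      have := PySem.List.pyRange_one_cons (a := 0) (b := linhas + 1) (by omega)
      simpa using this
    rw [hcons]
    simp only [List.foldl_cons]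
    have hstep0 : pvStepA mes diferencaDias feriados ([[PySem.Str.upper nome]], false) 0 =
        ([[PySem.Str.upper nome], pvHeaderRow], false) := by
      unfold pvStepA; simp
    rw [hstep0]
    obtain ⟨m, hm⟩ : ∃ m : Nat, linhas = (m : Int) := ⟨linhas.toNat, by omega⟩
    subst hm
    have h0 : pvFlag diferencaDias 0 = false := by unfold pvFlag; simp
    rw [← h0, pv_loop]
    have hmap : (PySem.List.pyRange 1 ((m : Int) + 1) 1).map (pvRow mes diferencaDias feriados)
        = (PySem.List.pyRange 1 ((m : Int) + 1) 1).map
            (pvMkRow mes (pvLabels (m : Int) diferencaDias) (PySem.Set.ofList feriados)) := by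
      apply List.map_congr_left
      intro i hi
      rw [PySem.List.mem_pyRange_one] at hi
      exact (pv_row_eq mes diferencaDias (m : Int) feriados i hi.1 (by omega)).symm
    rw [hmap]
    have hge : ¬ ((m : Int) < 0) := by omega
    simp [hge]
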